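-- pv_equiv track=rewrite | github.com/henrypan1993/ZJU-DS-Learning-Portfolio | 编程作业/11-散列1 电话聊天狂人.py | find_chat_king
-- ===== SOURCE A (Python) =====
-- def find_chat_king(number_count):
--     """
--     找出聊天狂人（通话次数最多且号码最小的人）
--     Args:
--         number_count: 号码统计字典
--     Returns:
--         tuple: (聊天狂人号码, 通话次数, 并列人数)
--     """
--     if not number_count:
--         return None, 0, 0
--
--     max_count = max(number_count.values())
--
--     # 找出所有通话次数最多的号码
--     candidates = [number for number, count in number_count.items() if count == max_count]
--     candidates.sort()  # 按字典序排序以找到最小号码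
--
--     chat_king = candidates[0]  # 最小的号码
--     tie_count = len(candidates)  # 并列人数
--
--     return chat_king, max_count, tie_count
-- ===== SOURCE B (Python) =====
-- def find_chat_king(number_count):
--     best, max_count, tie_count = None, 0, 0
--     for number, count in number_count.items():
--         if best is None or count > max_count:
--             best, max_count, tie_count = number, count, 1
--         elif count == max_count:
--             tie_count += 1
--             if number < best:
--                 best = number
--     return best, max_count, tie_count
-- ===== Notes on version B (the rewrite author's own statement) =====
-- stated objective: simpler
-- what changed: Replaces the multi-pass max()+candidate-list+sort pipeline with a single pass over the items that maintains (best_number, max_count, tie_count) directly.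
import Mathlib
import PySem

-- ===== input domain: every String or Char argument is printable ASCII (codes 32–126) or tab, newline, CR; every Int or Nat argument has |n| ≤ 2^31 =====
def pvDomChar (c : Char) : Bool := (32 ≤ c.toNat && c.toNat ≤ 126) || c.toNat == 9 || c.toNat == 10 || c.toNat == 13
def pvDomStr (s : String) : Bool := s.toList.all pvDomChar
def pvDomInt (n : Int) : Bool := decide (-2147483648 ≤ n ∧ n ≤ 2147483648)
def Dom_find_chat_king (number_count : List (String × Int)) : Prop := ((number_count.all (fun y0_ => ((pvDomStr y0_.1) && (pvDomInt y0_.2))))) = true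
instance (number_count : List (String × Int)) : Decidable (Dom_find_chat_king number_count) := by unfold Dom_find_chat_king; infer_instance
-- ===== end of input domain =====

-- B replaces A's max()+filter+sort pipeline with one fold that maintains (best, max_count, tie_count): simpler, one pass.


-- ===== PORT A =====
def find_chat_king (number_count : List (String × Int)) : Option String × Int × Int :=
  if number_count = [] then (none, 0, 0)
  else
    match PySem.List.max? (number_count.map Prod.snd) (fun v => v) with
    | none => (none, 0, 0)   -- unreachable: number_count ≠ [] (totality guard only)
    | some max_count =>
      let candidates := (number_count.filter (fun p => p.2 == max_count)).map Prod.fst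
      let candidates := PySem.List.sorted candidates (fun x => x) false
      (PySem.List.pyGet? candidates 0, max_count, (candidates.length : Int))

-- ===== PORT B =====
def pvStep (st : Option String × Int × Int) (p : String × Int) : Option String × Int × Int :=
  match st with
  | (none, _, _) => (some p.1, p.2, 1)
  | (some best, max_count, tie_count) =>
    if max_count < p.2 then (some p.1, p.2, 1)
    else if p.2 = max_count then
      (some (if p.1 < best then p.1 else best), max_count, tie_count + 1)
    else (some best, max_count, tie_count)

def find_chat_king_alt (number_count : List (String × Int)) : Option String × Int × Int :=
  number_count.foldl pvStep (none, 0, 0)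

-- ===== PRECONDITION & SPEC =====
def Spec_find_chat_king (number_count : List (String × Int)) (out : Option String × Int × Int) : Prop := out = find_chat_king_alt number_count
instance (number_count : List (String × Int)) (out : Option String × Int × Int) : Decidable (Spec_find_chat_king number_count out) := by unfold Spec_find_chat_king; infer_instance

-- ===== CLAIM (what is proved, stated in full; the proofs are below) =====
def Claim_equal_find_chat_king : Prop := ∀ (number_count : List (String × Int)), Dom_find_chat_king number_count → Spec_find_chat_king number_count (find_chat_king number_count)

-- ===== LEMMAS AND PROOFS =====

def pvKeysWith (m : Int) (l : List (String × Int)) : List String :=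
  (l.filter (fun p => p.2 == m)).map Prod.fst
def pvChar (l : List (String × Int)) (out : Option String × Int × Int) : Prop :=
  ∃ b M, out = (some b, M, (l.countP (fun p => p.2 == M) : Int)) ∧
    (∃ p ∈ l, p.2 = M) ∧ (∀ p ∈ l, p.2 ≤ M) ∧
    b ∈ pvKeysWith M l ∧ (∀ k ∈ pvKeysWith M l, b ≤ k)


lemma pvChar_unique (l : List (String × Int)) (o1 o2 : Option String × Int × Int)
    (h1 : pvChar l o1) (h2 : pvChar l o2) : o1 = o2 := by
  obtain ⟨b1, M1, e1, ⟨p1, hp1, hv1⟩, hle1, hb1, hmin1⟩ := h1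
  obtain ⟨b2, M2, e2, ⟨p2, hp2, hv2⟩, hle2, hb2, hmin2⟩ := h2
  have hM : M1 = M2 := le_antisymm (hv1 ▸ hle2 p1 hp1) (hv2 ▸ hle1 p2 hp2)
  subst hM
  have hb : b1 = b2 := le_antisymm (hmin1 b2 hb2) (hmin2 b1 hb1)
  rw [e1, e2, hb]

lemma pvChar_B (l : List (String × Int)) (hl : l ≠ []) : pvChar l (find_chat_king_alt l) := by
  induction l using List.reverseRecOn with
  | nil => exact absurd rfl hl
  | append_singleton xs p ih =>
    unfold find_chat_king_alt at *
    rw [List.foldl_append]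
    rcases eq_or_ne xs [] with rfl | hxs
    · refine ⟨p.1, p.2, ?_, ⟨p, by simp, rfl⟩, by simp, ?_, ?_⟩
      · simp [pvStep]
      · simp [pvKeysWith]
      · simp [pvKeysWith]
    · obtain ⟨b, M, hout, ⟨q, hq, hqv⟩, hle, hbmem, hbmin⟩ := ih hxs
      rw [hout]
      by_cases h1 : M < p.2
      · have hzero : xs.countP (fun r => r.2 == p.2) = 0 := by
          rw [List.countP_eq_zero]
          intro r hr
          simp only [beq_iff_eq]
          exact fun h => absurd (h ▸ hle r hr) (not_le.mpr h1)
        have hfil : xs.filter (fun r => r.2 == p.2) = [] := by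
          rw [List.filter_eq_nil_iff]
          intro r hr
          simp only [beq_iff_eq]
          exact fun h => absurd (h ▸ hle r hr) (not_le.mpr h1)
        refine ⟨p.1, p.2, ?_, ⟨p, by simp, rfl⟩, ?_, ?_, ?_⟩
        · simp [pvStep, h1, List.countP_append, hzero]
        · intro r hr
          rcases List.mem_append.mp hr with h | h
          · exact le_of_lt (lt_of_le_of_lt (hle r h) h1)
          · simp at h; simp [h]
        · simp [pvKeysWith, List.filter_append, hfil]
        · simp [pvKeysWith, List.filter_append, hfil]
      · by_cases h2 : p.2 = M
        · have hone : List.countP (fun r => r.2 == M) [p] = 1 := by simp [h2]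
          have hkw : pvKeysWith M (xs ++ [p]) = pvKeysWith M xs ++ [p.1] := by
            simp [pvKeysWith, List.filter_append, h2]
          refine ⟨(if p.1 < b then p.1 else b), M, ?_, ⟨q, by simp [hq], hqv⟩, ?_, ?_, ?_⟩
          · simp only [List.foldl_cons, List.foldl_nil, pvStep, if_neg h1, if_pos h2,
              List.countP_append, hone]
            push_cast; ring_nf
          · intro r hr
            rcases List.mem_append.mp hr with h | h
            · exact hle r h
            · simp at h; simp [h, h2]
          · rw [hkw]
            split
            · simp
            · exact List.mem_append_left _ hbmem
          · rw [hkw]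
            intro k hk
            rcases List.mem_append.mp hk with h | h
            · split
              · exact le_trans (le_of_lt (by assumption)) (hbmin k h)
              · exact hbmin k h
            · simp at h; subst h
              split
              · exact le_refl _
              · exact le_of_not_gt (by assumption)
        · have hzero : List.countP (fun r => r.2 == M) [p] = 0 := by simp [h2]
          have hkw : pvKeysWith M (xs ++ [p]) = pvKeysWith M xs := by
            simp [pvKeysWith, List.filter_append, h2]
          refine ⟨b, M, ?_, ⟨q, by simp [hq], hqv⟩, ?_, hkw ▸ hbmem, hkw ▸ hbmin⟩
          · simp [pvStep, h1, h2, List.countP_append, hzero]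
          · intro r hr
            rcases List.mem_append.mp hr with h | h
            · exact hle r h
            · simp at h; subst h
              exact le_of_not_gt h1

lemma pvChar_A (l : List (String × Int)) (hl : l ≠ []) : pvChar l (find_chat_king l) := by
  unfold find_chat_king
  rw [if_neg hl]
  rcases hM : PySem.List.max? (l.map Prod.snd) (fun v => v) with _ | M
  · exact absurd (List.map_eq_nil_iff.mp ((PySem.List.max?_eq_none_iff _ _).mp hM)) hl
  · have hmem : M ∈ l.map Prod.snd := PySem.List.max?_mem hM
    obtain ⟨q, hq, hqv⟩ := List.mem_map.mp hmem
    have hmax : ∀ p ∈ l, p.2 ≤ M := fun p hp =>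
      PySem.List.max?_isMax hM p.2 (List.mem_map_of_mem hp)
    have hcne : pvKeysWith M l ≠ [] := by
      simp only [pvKeysWith, ne_eq, List.map_eq_nil_iff, List.filter_eq_nil_iff]
      intro h
      exact h q hq (by simp [hqv])
    have hsne : PySem.List.sorted (pvKeysWith M l) (fun x => x) false ≠ [] := by
      rw [ne_eq, PySem.List.sorted_eq_nil_iff]
      exact hcne
    rcases hs : PySem.List.sorted (pvKeysWith M l) (fun x => x) false with _ | ⟨b, t⟩
    · exact absurd hs hsne
    · refine ⟨b, M, ?_, ⟨q, hq, hqv⟩, hmax, ?_, ?_⟩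
      · show (PySem.List.pyGet? (PySem.List.sorted ((l.filter (fun p => p.2 == M)).map Prod.fst) (fun x => x) false) 0, M, _) = _
        rw [show ((l.filter (fun p => p.2 == M)).map Prod.fst) = pvKeysWith M l from rfl, hs]
        simp [PySem.List.pyGet?, PySem.List.pyIdx?]
        have hlen : (b :: t).length = (pvKeysWith M l).length := by
          rw [← hs, PySem.List.length_sorted]
        simp only [pvKeysWith, List.length_map, ← List.countP_eq_length_filter,
          List.length_cons] at hlen
        omega
      · have : b ∈ PySem.List.sorted (pvKeysWith M l) (fun x => x) false := by
          rw [hs]; exact List.mem_cons_self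
        exact (PySem.List.mem_sorted _ _ _ _).mp this
      · exact PySem.List.key_head_sorted_le _ _ hs

-- ===== VERDICT (by name: the statement is the Claim_ definition above) =====
theorem find_chat_king_spec : Claim_equal_find_chat_king := by
  intro l _
  unfold Spec_find_chat_king
  rcases eq_or_ne l [] with rfl | hl
  · rfl
  · exact pvChar_unique l _ _ (pvChar_A l hl) (pvChar_B l hl)
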